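-- pv_equiv track=rewrite | github.com/femiaiyeku/Algorithm_Exprt_Project | Graphs/Rectangle_Mania/solution_1.py | getCoordsTable
-- ===== SOURCE A (Python) =====
-- def getCoordsTable(coords):
--     coordsTable = {}
--     for coord1 in coords:
--         coord1Directions = {
--             "right": [],
--             "up": []
--         }
--         for coord2 in coords:
--             coord2Direction = getCoordDirection(coord1, coord2)
--             if coord2Direction in coord1Directions:
--                 coord1Directions[coord2Direction].append(coord2)
--         coord1String = coordToString(coord1)
--         coordsTable[coord1String] = coord1Directions
--     return coordsTable
--
-- def getCoordDirection(coord1, coord2):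
--     x1, y1 = coord1
--     x2, y2 = coord2
--     if y2 == y1:
--         return "right" if x2 > x1 else "left"
--     return "up" if y2 > y1 else "down"
--
-- def coordToString(coord):
--     x, y = coord
--     return str(x) + "-" + str(y)
-- ===== SOURCE B (Python) =====
-- def getCoordsTable(coords):
--     rows = {}
--     for c in coords:
--         rows.setdefault(c[1], []).append(c)
--     ups = {}
--     for y in rows:
--         ups[y] = [c for c in coords if c[1] > y]
--     table = {}
--     for x, y in coords:
--         table[str(x) + "-" + str(y)] = {
--             "right": [c for c in rows[y] if c[0] > x],
--             "up": ups[y],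
--         }
--     return table
-- ===== Notes on version B (the rewrite author's own statement) =====
-- stated objective: faster
-- what changed: B builds a y->row dict in one pass and memoizes the 'up' list once per distinct y, then assembles each entry from the row group and the memo, instead of A's inner full scan classifying every (coord1, coord2) pair by direction string.
import Mathlib
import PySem

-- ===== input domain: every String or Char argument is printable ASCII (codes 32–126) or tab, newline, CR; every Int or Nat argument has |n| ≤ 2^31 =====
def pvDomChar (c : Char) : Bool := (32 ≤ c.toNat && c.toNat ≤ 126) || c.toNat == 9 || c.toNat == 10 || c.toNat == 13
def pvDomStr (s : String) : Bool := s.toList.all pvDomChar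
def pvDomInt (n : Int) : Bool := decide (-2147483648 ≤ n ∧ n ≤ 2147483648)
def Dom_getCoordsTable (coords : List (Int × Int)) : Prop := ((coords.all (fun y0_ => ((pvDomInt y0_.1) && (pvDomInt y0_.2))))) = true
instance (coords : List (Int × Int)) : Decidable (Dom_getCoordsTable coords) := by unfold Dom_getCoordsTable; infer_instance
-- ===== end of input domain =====

-- B groups coords by row once and memoizes the per-row "up" list, replacing A's pairwise
-- direction classification; objective: faster (removes the inner full scan per coordinate).


-- ===== PORT A =====
def getCoordDirection (coord1 coord2 : Int × Int) : String :=
  if coord2.2 == coord1.2 then (if coord2.1 > coord1.1 then "right" else "left")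
  else (if coord2.2 > coord1.2 then "up" else "down")

def coordToString (coord : Int × Int) : String :=
  PySem.Int.toStr coord.1 ++ "-" ++ PySem.Int.toStr coord.2

-- body of A's inner loop: classify coord2 and append it to the matching direction list
def stepA (coord1 : Int × Int) (d : PySem.Dict String (List (Int × Int))) (coord2 : Int × Int) :
    PySem.Dict String (List (Int × Int)) :=
  let dir := getCoordDirection coord1 coord2
  if d.contains dir then d.modify dir [] (fun v => v ++ [coord2]) else d

def getCoordsTable (coords : List (Int × Int)) : List (String × List (String × List (Int × Int))) :=
  (coords.foldl (fun table coord1 =>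
      let dirs := coords.foldl (stepA coord1) (PySem.Dict.ofList [("right", []), ("up", [])])
      table.insert (coordToString coord1) dirs)
    PySem.Dict.empty).items.map (fun p => (p.1, p.2.items))

-- ===== PORT B =====
def getCoordsTable_alt (coords : List (Int × Int)) : List (String × List (String × List (Int × Int))) :=
  let rows : PySem.Dict Int (List (Int × Int)) :=
    coords.foldl (fun d c => d.modify c.2 [] (fun v => v ++ [c])) PySem.Dict.empty
  let ups : PySem.Dict Int (List (Int × Int)) :=
    rows.keys.foldl (fun d y => d.insert y (coords.filter (fun c => decide (c.2 > y)))) PySem.Dict.empty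
  (coords.foldl (fun table c =>
      table.insert (PySem.Int.toStr c.1 ++ "-" ++ PySem.Int.toStr c.2)
        (PySem.Dict.ofList
          [("right", (rows.getD c.2 []).filter (fun c2 => decide (c2.1 > c.1))),
           ("up", ups.getD c.2 [])]))
    PySem.Dict.empty).items.map (fun p => (p.1, p.2.items))

-- ===== PRECONDITION & SPEC =====
def Spec_getCoordsTable (coords : List (Int × Int)) (out : List (String × List (String × List (Int × Int)))) : Prop := out = getCoordsTable_alt coords
instance (coords : List (Int × Int)) (out : List (String × List (String × List (Int × Int)))) : Decidable (Spec_getCoordsTable coords out) := by unfold Spec_getCoordsTable; infer_instance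

-- ===== CLAIM (what is proved, stated in full; the proofs are below) =====
def Claim_equal_getCoordsTable : Prop := ∀ (coords : List (Int × Int)), Dom_getCoordsTable coords → Spec_getCoordsTable coords (getCoordsTable coords)

-- ===== LEMMAS AND PROOFS =====

-- the row-grouping fold of B: its lookup at y is exactly the same-row filter
lemma rows_getD (l : List (Int × Int)) (d : PySem.Dict Int (List (Int × Int))) (y : Int) :
    (l.foldl (fun d c => d.modify c.2 [] (fun v => v ++ [c])) d).getD y []
      = d.getD y [] ++ l.filter (fun c => c.2 == y) := by
  induction l generalizing d with
  | nil => simp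
  | cons c l ih =>
    simp only [List.foldl_cons, ih, PySem.Dict.getD_modify, List.filter_cons]
    by_cases h : c.2 = y
    · simp [h]
    · simp [h, Ne.symm h, beq_iff_eq]

-- the memo fold of B: lookup of a key in the fed list yields its memoized value
lemma ups_getD (ys : List Int) (g : Int → List (Int × Int)) (d : PySem.Dict Int (List (Int × Int))) (z : Int) :
    (ys.foldl (fun d y => d.insert y (g y)) d).getD z []
      = if z ∈ ys then g z else d.getD z [] := by
  induction ys generalizing d with
  | nil => simp
  | cons y ys ih =>
    simp only [List.foldl_cons, ih, PySem.Dict.getD_insert, List.mem_cons]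
    by_cases hz : z ∈ ys
    · simp [hz]
    · by_cases hy : z = y <;> simp [hz, hy]

-- A's inner classification loop, characterised as two filters
lemma innerA (c1 : Int × Int) (l : List (Int × Int)) (r u : List (Int × Int)) :
    l.foldl (stepA c1) (PySem.Dict.mk [("right", r), ("up", u)])
      = PySem.Dict.mk
          [("right", r ++ l.filter (fun c2 => c2.2 == c1.2 && decide (c2.1 > c1.1))),
           ("up", u ++ l.filter (fun c2 => !(c2.2 == c1.2) && decide (c2.2 > c1.2)))] := by
  induction l generalizing r u with
  | nil => simp
  | cons c l ih =>
    rw [List.foldl_cons]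
    by_cases h1 : c.2 = c1.2
    · by_cases h2 : c.1 > c1.1
      · rw [show stepA c1 (PySem.Dict.mk [("right", r), ("up", u)]) c
            = PySem.Dict.mk [("right", r ++ [c]), ("up", u)] from by
          simp only [stepA, getCoordDirection, h1, h2, beq_self_eq_true, if_true]; rfl]
        rw [ih]
        simp [h1, h2]
      · rw [show stepA c1 (PySem.Dict.mk [("right", r), ("up", u)]) c
            = PySem.Dict.mk [("right", r), ("up", u)] from by
          simp only [stepA, getCoordDirection, h1, h2, beq_self_eq_true, if_true, if_false]; rfl]
        rw [ih]
        simp [h1, h2]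
    · by_cases h2 : c.2 > c1.2
      · rw [show stepA c1 (PySem.Dict.mk [("right", r), ("up", u)]) c
            = PySem.Dict.mk [("right", r), ("up", u ++ [c])] from by
          simp only [stepA, getCoordDirection, h1, h2, beq_iff_eq, if_false, if_true]; rfl]
        rw [ih]
        simp [h1, h2]
      · rw [show stepA c1 (PySem.Dict.mk [("right", r), ("up", u)]) c
            = PySem.Dict.mk [("right", r), ("up", u)] from by
          simp only [stepA, getCoordDirection, h1, h2, beq_iff_eq, if_false]; rfl]
        rw [ih]
        simp [h1, h2]

-- ===== VERDICT (by name: the statement is the Claim_ definition above) =====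
theorem getCoordsTable_spec : Claim_equal_getCoordsTable := by
  intro coords _
  show getCoordsTable coords = getCoordsTable_alt coords
  unfold getCoordsTable getCoordsTable_alt
  congr 1
  congr 1
  apply PySem.List.foldl_congr_mem
  intro t c hc
  have hA := innerA c coords [] []
  simp only [List.nil_append] at hA
  have hrows := rows_getD coords PySem.Dict.empty c.2
  simp only [PySem.Dict.getD_empty, List.nil_append] at hrows
  have hmem : c.2 ∈ (coords.foldl (fun d c => d.modify c.2 [] (fun v => v ++ [c])) PySem.Dict.empty).keys := by
    rw [PySem.Dict.keys_foldl_modify_key coords (fun c => c.2) [] (fun _ c v => v ++ [c]) PySem.Dict.empty,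
      PySem.Dict.keys_empty, PySem.Set.update_nil_left, PySem.Set.mem_ofList]
    exact List.mem_map.mpr ⟨c, hc, rfl⟩
  rw [show (PySem.Dict.ofList [("right", ([] : List (Int × Int))), ("up", [])])
      = PySem.Dict.mk [("right", []), ("up", [])] from rfl, hA]
  rw [show ∀ a b : List (Int × Int), (PySem.Dict.ofList [("right", a), ("up", b)])
      = PySem.Dict.mk [("right", a), ("up", b)] from fun a b => rfl]
  rw [hrows, List.filter_filter, ups_getD, if_pos hmem]
  have hr : (List.filter (fun c2 => c2.2 == c.2 && decide (c2.1 > c.1)) coords)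
      = List.filter (fun a => decide (a.1 > c.1) && a.2 == c.2) coords :=
    List.filter_congr (fun x _ => by by_cases h : x.2 = c.2 <;> simp [h, Bool.and_comm])
  have hu : (List.filter (fun c2 => !(c2.2 == c.2) && decide (c2.2 > c.2)) coords)
      = List.filter (fun c2 => decide (c2.2 > c.2)) coords :=
    List.filter_congr (fun x _ => by by_cases h : x.2 = c.2 <;> simp [h])
  simp only [coordToString, hr, hu]
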